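-- pv_equiv track=rewrite | github.com/betcherj/AOC_2025 | day3/part1.py | get_row_voltage
-- ===== SOURCE A (Python) =====
-- def get_row_voltage(row):
--     reversed_row = row[::-1]
--     leading_digit = reversed_row[1]
--     trailing_digit = reversed_row[0]
--     leading_digit_idx = 1
--     for idx, digit in enumerate(reversed_row[2:]):
--         if digit >= leading_digit:
--             leading_digit = digit
--             leading_digit_idx = idx + 2
--             trailing_digit = max(reversed_row[:idx+2])
--
--     trailing_digit = max(reversed_row[:leading_digit_idx])
--     return int(str(leading_digit) + str(trailing_digit))
-- ===== SOURCE B (Python) =====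
-- def get_row_voltage(row):
--     leading = max(row[:-1])
--     trailing = max(row[row.index(leading) + 1:])
--     return int(leading + trailing)
-- ===== Notes on version B (the rewrite author's own statement) =====
-- stated objective: faster
-- what changed: Replaces A's reverse-then-scan loop (which tracks the last suffix argmax index and recomputes prefix maxima) by three library passes on the forward list: leading = max(row[:-1]), then trailing = max of the part of row after the first occurrence of that maximum; the manual enumerate loop, the index bookkeeping and the dead in-loop max disappear.
import Mathlib
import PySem

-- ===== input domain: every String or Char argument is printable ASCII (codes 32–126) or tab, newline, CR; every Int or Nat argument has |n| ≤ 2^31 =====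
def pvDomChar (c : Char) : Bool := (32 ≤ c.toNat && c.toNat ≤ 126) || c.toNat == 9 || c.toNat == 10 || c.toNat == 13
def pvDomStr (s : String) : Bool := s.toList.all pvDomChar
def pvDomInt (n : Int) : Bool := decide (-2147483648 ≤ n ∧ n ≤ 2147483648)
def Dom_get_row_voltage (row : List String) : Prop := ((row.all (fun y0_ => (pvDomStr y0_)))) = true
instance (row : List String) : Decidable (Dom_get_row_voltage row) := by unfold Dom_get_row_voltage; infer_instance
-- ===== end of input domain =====

-- B replaces A's reverse-then-scan index loop by three forward library passes (max, index, max of the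
-- rest); objective: faster (A recomputes a prefix maximum inside its loop). No argument is mutated.

-- ===== PORT A =====
-- loop body of A's 'for idx, digit in enumerate(reversed_row[2:])'; state = (leading, leading_idx, trailing)
def aStep (reversed_row : List String) (s : String × Int × String) (p : Int × String) : String × Int × String :=
  if s.1 ≤ p.2 then
    (p.2, p.1 + 2, (PySem.List.max? (PySem.List.slice reversed_row none (some (p.1 + 2))) (fun x => x)).getD "")
  else s

def get_row_voltage (row : List String) : Int :=
  let reversed_row := (PySem.List.slice? row none none (-1)).getD []   -- row[::-1] (never raises)
  let leading0 := PySem.List.pyGetD reversed_row 1 ""                  -- reversed_row[1]; IndexError → outside Pre_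
  let trailing0 := PySem.List.pyGetD reversed_row 0 ""                 -- reversed_row[0]
  let st := (PySem.List.enumerate (PySem.List.slice reversed_row (some 2) none) 0).foldl
              (aStep reversed_row) (leading0, 1, trailing0)
  let trailing := (PySem.List.max? (PySem.List.slice reversed_row none (some st.2.1)) (fun x => x)).getD ""
  -- str() of a str is the string itself; int(leading + trailing), ValueError → outside Pre_
  (PySem.Int.ofChars? (st.1.toList ++ trailing.toList)).getD 0

-- ===== PORT B =====
def get_row_voltage_alt (row : List String) : Int :=
  let leading := (PySem.List.max? (PySem.List.slice row none (some (-1))) (fun x => x)).getD ""   -- max(row[:-1])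
  let p : Int := ((PySem.List.index? row leading).getD 0 : Nat)                                   -- row.index(leading)
  let trailing := (PySem.List.max? (PySem.List.slice row (some (p + 1)) none) (fun x => x)).getD ""
  (PySem.Int.ofChars? (leading.toList ++ trailing.toList)).getD 0

-- ===== PRECONDITION & SPEC =====
-- codepoint-lexicographic string comparison, Boolean so that Pre_ is kernel-decidable
-- (Lean's own String.decidableLE does not reduce in the kernel); exact Python '<' on strings
def pyStrLtB : List Char → List Char → Bool
  | [], [] => false
  | [], _ :: _ => true
  | _ :: _, [] => false
  | a :: as, b :: bs => if a.val < b.val then true else if b.val < a.val then false else pyStrLtB as bs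

-- Pre_ is exactly the inputs on which A returns: at least two strings, and the selected pair — the largest
-- string of row[:-1] at its first (strictly dominating) position i, together with any j > i whose string
-- bounds everything after i — concatenates to a valid int literal; outside Pre_ A raises IndexError
-- (length < 2) or ValueError (int() on a non-literal).
def Pre_get_row_voltage (row : List String) : Prop :=
  2 ≤ row.length ∧
  ∀ i ∈ List.range row.length, ∀ j ∈ List.range row.length, i + 1 < row.length → i < j →
    (∀ k ∈ List.range row.length, k + 1 < row.length →
      pyStrLtB (row.getD i "").toList (row.getD k "").toList = false) →
    (∀ k ∈ List.range row.length, k < i →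
      pyStrLtB (row.getD k "").toList (row.getD i "").toList = true) →
    (∀ k ∈ List.range row.length, i < k →
      pyStrLtB (row.getD j "").toList (row.getD k "").toList = false) →
    (PySem.Int.ofChars? ((row.getD i "").toList ++ (row.getD j "").toList)).isSome = true
instance (row : List String) : Decidable (Pre_get_row_voltage row) := by
  unfold Pre_get_row_voltage; infer_instance

def pvWitness_get_row_voltage : List String := ["905", "77", "31"]

def Spec_get_row_voltage (row : List String) (out : Int) : Prop := out = get_row_voltage_alt row
instance (row : List String) (out : Int) : Decidable (Spec_get_row_voltage row out) := by
  unfold Spec_get_row_voltage; infer_instance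

-- ===== CLAIM (what is proved, stated in full; the proofs are below) =====
def Claim_equal_get_row_voltage : Prop :=
  ∀ (row : List String), Dom_get_row_voltage row → Pre_get_row_voltage row →
    Spec_get_row_voltage row (get_row_voltage row)

-- ===== LEMMAS AND PROOFS =====

-- Python max(xs) returns THE maximum value: any member that bounds the list is the result.
lemma max?_eq_of_bound (xs : List String) (M : String) (hM : M ∈ xs) (hall : ∀ y ∈ xs, y ≤ M) :
    PySem.List.max? xs (fun x => x) = some M := by
  cases hx : PySem.List.max? xs (fun x => x) with
  | none =>
      rw [PySem.List.max?_eq_none_iff] at hx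
      simp [hx] at hM
  | some m =>
      have h1 : m ∈ xs := PySem.List.max?_mem hx
      have h2 := PySem.List.max?_isMax hx M hM
      exact congrArg some (le_antisymm (hall m h1) h2)

-- Characterisation of A's loop: after folding aStep over enumerate(reversed_row[2:]) the state splits
-- l0 :: ys as pre ++ M :: suf where M is the running maximum (the LAST occurrence: '>=' updates on ties,
-- so everything in suf is strictly below M) and leading_idx = pre.length + 1.
lemma loop_char (rev : List String) (l0 t0 : String) (ys : List String) :
    ∃ (pre suf : List String) (M : String),
      l0 :: ys = pre ++ M :: suf ∧
      ((PySem.List.enumerate ys 0).foldl (aStep rev) (l0, 1, t0)).1 = M ∧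
      ((PySem.List.enumerate ys 0).foldl (aStep rev) (l0, 1, t0)).2.1 = (pre.length : Int) + 1 ∧
      (∀ x ∈ pre, x ≤ M) ∧ (∀ x ∈ suf, x < M) := by
  induction ys using List.reverseRecOn with
  | nil =>
      exact ⟨[], [], l0, by simp, by simp [PySem.List.enumerate_nil], by simp [PySem.List.enumerate_nil], by simp, by simp⟩
  | append_singleton zs y ih =>
      obtain ⟨pre, suf, M, hdec, h1, h2, hpre, hsuf⟩ := ih
      have henum : PySem.List.enumerate (zs ++ [y]) 0
          = PySem.List.enumerate zs 0 ++ [((zs.length : Int), y)] := by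
        rw [PySem.List.enumerate_append]
        simp [PySem.List.enumerate_cons, PySem.List.enumerate_nil]
      rw [henum, List.foldl_append]
      set st := (PySem.List.enumerate zs 0).foldl (aStep rev) (l0, 1, t0) with hst
      have hlen : zs.length + 1 = pre.length + suf.length + 1 := by
        have := congrArg List.length hdec; simp at this; omega
      by_cases hcase : st.1 ≤ y
      · refine ⟨pre ++ M :: suf, [], y, ?_, ?_, ?_, ?_, ?_⟩
        · rw [show l0 :: (zs ++ [y]) = (l0 :: zs) ++ [y] by simp, hdec]
        · simp only [List.foldl_cons, List.foldl_nil, aStep, if_pos hcase]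
        · simp only [List.foldl_cons, List.foldl_nil, aStep, if_pos hcase]
          simp only [List.length_append, List.length_cons]
          push_cast
          omega
        · intro x hx
          have hMy : M ≤ y := h1 ▸ hcase
          simp at hx
          rcases hx with hx | rfl | hx
          · exact le_trans (hpre x hx) hMy
          · exact hMy
          · exact le_trans (le_of_lt (hsuf x hx)) hMy
        · simp
      · refine ⟨pre, suf ++ [y], M, ?_, ?_, ?_, hpre, ?_⟩
        · rw [show l0 :: (zs ++ [y]) = (l0 :: zs) ++ [y] by simp, hdec]; simp
        · simpa [List.foldl_cons, List.foldl_nil, aStep, hcase] using h1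
        · simpa [List.foldl_cons, List.foldl_nil, aStep, hcase] using h2
        · intro x hx
          simp at hx
          rcases hx with hx | rfl
          · exact hsuf x hx
          · rw [← h1]; exact lt_of_not_ge hcase

-- The two ports agree whenever the row has at least two entries (the digit-string part of Pre_ only
-- keeps Python's int() from raising; both programs parse the same concatenated string).
lemma ab_agree : ∀ (row : List String), 2 ≤ row.length →
    get_row_voltage row = get_row_voltage_alt row := by
  intro row hlen
  have hrl : 2 ≤ row.reverse.length := by simpa using hlen
  rcases hrev : row.reverse with _ | ⟨t0, rest⟩
  · rw [hrev] at hrl; simp at hrl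
  rcases rest with _ | ⟨l0, ys⟩
  · rw [hrev] at hrl; simp at hrl
  have hrow : row = ys.reverse ++ [l0, t0] := by
    have := congrArg List.reverse hrev
    simpa using this
  obtain ⟨pre, suf, M, hdec, h1, h2, hpre, hsuf⟩ := loop_char (t0 :: l0 :: ys) l0 t0 ys
  -- reversed decomposition of the forward row
  have hrowdec : row = List.reverse suf ++ M :: (List.reverse pre ++ [t0]) := by
    have h := congrArg List.reverse hdec
    simp only [List.reverse_cons, List.reverse_append] at h
    rw [hrow]
    rw [show ([l0, t0] : List String) = [l0] ++ [t0] by simp, ← List.append_assoc]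
    rw [h]
    simp
  -- A side
  simp only [get_row_voltage, PySem.List.slice?_none_none_neg_one, Option.getD_some, hrev]
  have hget1 : PySem.List.pyGetD (t0 :: l0 :: ys) 1 "" = l0 := by
    simp [PySem.List.pyGetD, PySem.List.pyGet?, PySem.List.pyIdx?]
  have hget0 : PySem.List.pyGetD (t0 :: l0 :: ys) 0 "" = t0 := by
    rw [PySem.List.pyGetD_zero_cons]
  have hsl2 : PySem.List.slice (t0 :: l0 :: ys) (some 2) none = ys := by
    rw [PySem.List.slice_from (t0 :: l0 :: ys) ((by norm_num) : (0:Int) ≤ 2)]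
    rfl
  rw [hget1, hget0, hsl2, h1, h2]
  -- A's trailing list: rev.take (pre.length + 1) = t0 :: pre
  have htakeA : PySem.List.slice (t0 :: l0 :: ys) none (some ((pre.length : Int) + 1)) = t0 :: pre := by
    rw [PySem.List.slice_to (t0 :: l0 :: ys) ((by positivity) : (0:Int) ≤ (pre.length : Int) + 1)]
    have : (((pre.length : Int)) + 1).toNat = pre.length + 1 := by omega
    rw [this, hdec]
    simp
  rw [htakeA]
  -- B side
  simp only [get_row_voltage_alt]
  have hdlast : PySem.List.slice row none (some (-1)) = List.reverse ys ++ [l0] := by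
    rw [PySem.List.slice_to_neg_one, hrow,
      show List.reverse ys ++ [l0, t0] = (List.reverse ys ++ [l0]) ++ [t0] by simp]
    exact List.dropLast_concat
  -- membership facts
  have hmemM : ∀ x, x ∈ List.reverse ys ++ [l0] ↔ x ∈ pre ∨ x = M ∨ x ∈ suf := by
    intro x
    have h2 : x ∈ l0 :: ys ↔ x ∈ pre ++ M :: suf := by rw [hdec]
    simp only [List.mem_cons, List.mem_append] at h2
    simp only [List.mem_append, List.mem_reverse, List.mem_cons]
    tauto
  have hleadB : PySem.List.max? (List.reverse ys ++ [l0]) (fun x => x) = some M := by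
    apply max?_eq_of_bound
    · rw [hmemM]; tauto
    · intro y hy
      rw [hmemM] at hy
      rcases hy with hy | rfl | hy
      · exact hpre y hy
      · exact le_refl _
      · exact le_of_lt (hsuf y hy)
  rw [hdlast, hleadB]
  simp only [Option.getD_some]
  -- index
  have hidx : PySem.List.index? row M = some suf.reverse.length := by
    rw [PySem.List.index?_eq_some_iff]
    exact ⟨suf.reverse, List.reverse pre ++ [t0], hrowdec, rfl, by
      intro hMin
      rw [List.mem_reverse] at hMin
      exact absurd rfl (ne_of_lt (hsuf M hMin))⟩
  rw [hidx]
  simp only [Option.getD_some]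
  -- drop
  have hdropB : PySem.List.slice row (some ((suf.reverse.length : Int) + 1)) none
      = List.reverse pre ++ [t0] := by
    rw [PySem.List.slice_from row ((by positivity) : (0:Int) ≤ (suf.reverse.length : Int) + 1)]
    have : (((suf.reverse.length : Int)) + 1).toNat = suf.reverse.length + 1 := by omega
    rw [this, hrowdec]
    rw [show List.reverse suf ++ M :: (List.reverse pre ++ [t0])
        = (List.reverse suf ++ [M]) ++ (List.reverse pre ++ [t0]) by simp]
    have hl : suf.reverse.length + 1 = (List.reverse suf ++ [M]).length := by simp
    rw [hl, List.drop_left]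
  rw [hdropB]
  -- trailing values agree
  rcases hTA : PySem.List.max? (t0 :: pre) (fun x => x) with _ | T
  · rw [PySem.List.max?_eq_none_iff] at hTA; simp at hTA
  have hTmem : T ∈ t0 :: pre := PySem.List.max?_mem hTA
  have hTmax := PySem.List.max?_isMax hTA
  have hTB : PySem.List.max? (List.reverse pre ++ [t0]) (fun x => x) = some T := by
    apply max?_eq_of_bound
    · simp at hTmem ⊢; tauto
    · intro y hy
      apply hTmax
      simp at hy ⊢; tauto
  rw [hTB]

-- ===== VERDICT (by name: the statement is the Claim_ definition above) =====
theorem get_row_voltage_spec : Claim_equal_get_row_voltage := by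
  intro row _hdom hpre
  exact ab_agree row hpre.1
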